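-- pv_equiv track=rewrite | github.com/eugeneli1/Fight-the-Landlord | FightTheLandlord/game_client.py | checkDoubleSequence
-- ===== SOURCE A (Python) =====
-- def checkDoubleSequence(L):
--     rows = len(L)
--     for i in range(rows):
--         if len(L[i]) != 2:
--             return False
--     check = []
--     for i in range(rows):
--         check.append(L[i][0])
--     mini = min(check)
--     maxi = max(check)
--     return check == list(range(mini,maxi+1)) and len(check) >= 3
-- ===== SOURCE B (Python) =====
-- def checkDoubleSequence(L):
--     check = []
--     for row in L:
--         if len(row) != 2:
--             return False
--         check.append(row[0])
--     mini = min(check)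
--     if len(check) < 3:
--         return False
--     for i, v in enumerate(check):
--         if v != mini + i:
--             return False
--     return True
-- ===== Notes on version B (the rewrite author's own statement) =====
-- stated objective: simpler
-- what changed: B verifies row shapes and collects first elements in one pass, then checks consecutiveness incrementally against the minimum anchor (check[i] == mini + i), instead of materialising list(range(mini, maxi+1)) and comparing lists; both raise ValueError on empty input via min(), so Pre_ excludes the empty list.
-- outside the precondition, e.g. on checkDoubleSequence([]): A raises ValueError, B raises ValueError
import Mathlib
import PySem

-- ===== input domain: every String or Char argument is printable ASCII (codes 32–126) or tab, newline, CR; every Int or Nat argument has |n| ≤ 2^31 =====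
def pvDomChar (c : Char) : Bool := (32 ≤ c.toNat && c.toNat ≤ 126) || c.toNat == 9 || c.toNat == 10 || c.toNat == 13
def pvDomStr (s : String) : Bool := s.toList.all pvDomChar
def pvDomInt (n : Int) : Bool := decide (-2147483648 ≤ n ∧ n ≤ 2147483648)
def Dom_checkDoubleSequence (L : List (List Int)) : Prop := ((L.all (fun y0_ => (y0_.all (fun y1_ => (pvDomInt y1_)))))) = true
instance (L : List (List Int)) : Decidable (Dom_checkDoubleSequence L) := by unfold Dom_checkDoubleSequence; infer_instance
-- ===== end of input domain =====

-- B: one pass verifying row shapes while collecting first elements, then an incremental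
-- consecutiveness check against the minimum anchor, instead of A's range-list comparison (simpler).

-- ===== PORT A =====
-- the first loop: returns False as soon as some row's length differs from 2
-- (L[i][0] is ported as headI: the preceding loop guarantees each row has length 2, so it is exact there)
def checkDoubleSequence (L : List (List Int)) : Bool :=
  if L.any (fun row => row.length ≠ 2) then false
  else
    let check := L.map (fun row => row.headI)
    match PySem.List.min? check (fun x => x), PySem.List.max? check (fun x => x) with
    | some mini, some maxi =>
        decide (check = PySem.List.pyRange mini (maxi + 1) 1) && decide (3 ≤ check.length)
    | _, _ => false   -- unreachable inside Pre_ (there min() would raise only on empty check)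

-- ===== PORT B =====
-- the single pass of Source B: none = early 'return False' on a row whose length is not 2
def pvFirsts : List (List Int) → Option (List Int)
  | [] => some []
  | row :: rest =>
      if row.length ≠ 2 then none
      else (pvFirsts rest).map (fun c => row.headI :: c)

-- the final loop of Source B: check[i] == mini + i, carrying the expected value
def pvConsecFrom : List Int → Int → Bool
  | [], _ => true
  | v :: rest, e => v == e && pvConsecFrom rest (e + 1)

def checkDoubleSequence_alt (L : List (List Int)) : Bool :=
  match pvFirsts L with
  | none => false
  | some check =>
    match PySem.List.min? check (fun x => x) with
    | none => false   -- unreachable inside Pre_ (min() raises only on empty check)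
    | some mini =>
        if check.length < 3 then false
        else pvConsecFrom check mini

-- ===== PRECONDITION & SPEC =====
-- Pre_ excludes only the empty list, on which both Pythons raise ValueError at min([]).
def Pre_checkDoubleSequence (L : List (List Int)) : Prop := L ≠ []
instance (L : List (List Int)) : Decidable (Pre_checkDoubleSequence L) := by unfold Pre_checkDoubleSequence; infer_instance
def pvWitness_checkDoubleSequence : List (List Int) := [[3, 0], [4, 1], [5, 2]]

def Spec_checkDoubleSequence (L : List (List Int)) (out : Bool) : Prop := out = checkDoubleSequence_alt L
instance (L : List (List Int)) (out : Bool) : Decidable (Spec_checkDoubleSequence L out) := by unfold Spec_checkDoubleSequence; infer_instance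

-- ===== CLAIM (what is proved, stated in full; the proofs are below) =====
def Claim_equal_checkDoubleSequence : Prop := ∀ (L : List (List Int)), Dom_checkDoubleSequence L → Pre_checkDoubleSequence L → Spec_checkDoubleSequence L (checkDoubleSequence L)

-- ===== LEMMAS AND PROOFS =====

-- pvFirsts succeeds iff no row is malformed, and then yields the heads
theorem pvFirsts_of_ok (L : List (List Int)) (h : L.any (fun row => row.length ≠ 2) = false) :
    pvFirsts L = some (L.map (fun row => row.headI)) := by
  induction L with
  | nil => rfl
  | cons row rest ih =>
      simp only [List.any_cons, Bool.or_eq_false_iff] at h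
      have h1 : ¬ row.length ≠ 2 := by simpa using h.1
      simp [pvFirsts, h1, ih h.2]

theorem pvFirsts_of_bad (L : List (List Int)) (h : L.any (fun row => row.length ≠ 2) = true) :
    pvFirsts L = none := by
  induction L with
  | nil => simp at h
  | cons row rest ih =>
      by_cases hr : row.length ≠ 2
      · simp [pvFirsts, hr]
      · simp only [List.any_cons] at h
        simp [pvFirsts, hr, ih (by simpa [hr] using h)]

-- a range with step 1 is consecutive from its lower bound
theorem pvConsecFrom_pyRange (n : ℕ) (a : Int) :
    pvConsecFrom (PySem.List.pyRange a (a + n) 1) a = true := by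
  induction n generalizing a with
  | zero => rw [PySem.List.pyRange_one_eq_nil (by omega)]; rfl
  | succ m ih =>
      rw [PySem.List.pyRange_one_cons (by omega)]
      simp only [pvConsecFrom, beq_self_eq_true, Bool.true_and]
      have : a + (↑(m + 1) : Int) = (a + 1) + m := by push_cast; ring
      rw [this]; exact ih (a + 1)

-- a consecutive-from-e list IS the range starting at e of its length
theorem pvConsecFrom_eq_pyRange (l : List Int) (e : Int) (h : pvConsecFrom l e = true) :
    l = PySem.List.pyRange e (e + l.length) 1 := by
  induction l generalizing e with
  | nil => rw [PySem.List.pyRange_one_eq_nil (by simp)]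
  | cons v rest ih =>
      simp only [pvConsecFrom, Bool.and_eq_true, beq_iff_eq] at h
      obtain ⟨hv, h2⟩ := h
      have hlt : e < e + ((v :: rest).length : Int) := by
        have : (0 : Int) < (v :: rest).length := by exact_mod_cast (v :: rest).length_pos_of_ne_nil (by simp)
        omega
      rw [PySem.List.pyRange_one_cons hlt]
      have hlen : e + ((v :: rest).length : Int) = (e + 1) + (rest.length : Int) := by
        push_cast [List.length_cons]; ring
      rw [hlen]
      exact List.cons_eq_cons.mpr ⟨hv, ih (e + 1) h2⟩

-- the running max over a nonempty step-1 range
theorem pvFoldMax (n : ℕ) (a s : Int) :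
    (PySem.List.pyRange a (a + (n : Int) + 1) 1).foldl max s = max s (a + n) := by
  induction n generalizing a s with
  | zero =>
      have h1 : a + ((0 : ℕ) : Int) + 1 = a + 1 := by norm_num
      rw [h1, PySem.List.pyRange_one_singleton]
      norm_num
  | succ m ih =>
      rw [PySem.List.pyRange_one_cons (by push_cast; omega)]
      simp only [List.foldl_cons]
      have h2 : a + ((m + 1 : ℕ) : Int) + 1 = (a + 1) + (m : Int) + 1 := by push_cast; ring
      rw [h2, ih (a + 1) (max s a)]
      have h3 : max a ((a + 1) + (m : Int)) = (a + 1) + m := max_eq_right (by omega)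
      rw [max_assoc, h3]
      congr 1
      push_cast; ring

-- max of a nonempty step-1 range is its last element
theorem pvMax_pyRange (n : ℕ) (hn : 1 ≤ n) (a : Int) :
    PySem.List.max? (PySem.List.pyRange a (a + n) 1) (fun x => x) = some (a + n - 1) := by
  obtain ⟨k, rfl⟩ : ∃ k, n = k + 1 := ⟨n - 1, by omega⟩
  rw [PySem.List.pyRange_one_cons (by push_cast; omega)]
  rw [PySem.List.max?_id_cons]
  cases k with
  | zero =>
      have h1 : a + ((0 + 1 : ℕ) : Int) = a + 1 := by norm_num
      rw [h1, PySem.List.pyRange_one_eq_nil (by omega)]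
      simp
  | succ j =>
      have h1 : a + ((j + 1 + 1 : ℕ) : Int) = (a + 1) + (j : Int) + 1 := by push_cast; ring
      rw [h1, pvFoldMax j (a + 1) a]
      have h2 : max a ((a + 1) + (j : Int)) = (a + 1) + j := max_eq_right (by omega)
      rw [h2]
      congr 1
      ring

-- core agreement on the collected heads, once both sides reach the same nonempty check
theorem pvCore (check : List Int) (mini maxi : Int)
    (_hmin : PySem.List.min? check (fun x => x) = some mini)
    (hmax : PySem.List.max? check (fun x => x) = some maxi) :
    (decide (check = PySem.List.pyRange mini (maxi + 1) 1) && decide (3 ≤ check.length))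
      = (if check.length < 3 then false else pvConsecFrom check mini) := by
  by_cases hlen : check.length < 3
  · have h3 : ¬ (3 ≤ check.length) := by omega
    simp [hlen, h3]
  · simp only [if_neg hlen]
    by_cases hc : pvConsecFrom check mini = true
    · -- consecutive: check = pyRange mini (mini + len); max gives maxi = mini + len - 1
      have heq := pvConsecFrom_eq_pyRange check mini hc
      have h1 : 1 ≤ check.length := by omega
      have hmax' := pvMax_pyRange check.length h1 mini
      rw [← heq] at hmax'
      rw [hmax] at hmax'
      have hmm : maxi = mini + check.length - 1 := (Option.some.inj hmax')
      have : maxi + 1 = mini + check.length := by omega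
      rw [this, ← heq]
      simp [hc]; omega
    · -- not consecutive: the range equality must fail
      simp only [Bool.not_eq_true] at hc
      rw [hc]
      have hne : check ≠ PySem.List.pyRange mini (maxi + 1) 1 := by
        intro habs
        have hlenr : check.length = ((maxi + 1 - mini).toNat : ℕ) := by
          rw [habs, PySem.List.length_pyRange_one]
        have hrange : PySem.List.pyRange mini (maxi + 1) 1
            = PySem.List.pyRange mini (mini + ((maxi + 1 - mini).toNat : ℕ)) 1 := by
          by_cases hab : mini ≤ maxi + 1
          · congr 1; omega
          · rw [PySem.List.pyRange_one_eq_nil (by omega), PySem.List.pyRange_one_eq_nil (by omega)]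
        have := pvConsecFrom_pyRange ((maxi + 1 - mini).toNat) mini
        rw [← hrange, ← habs] at this
        rw [this] at hc
        exact Bool.true_eq_false.mp hc
      simp [hne]

-- ===== VERDICT (by name: the statement is the Claim_ definition above) =====
theorem checkDoubleSequence_spec : Claim_equal_checkDoubleSequence := by
  intro L _ hpre
  unfold Spec_checkDoubleSequence checkDoubleSequence checkDoubleSequence_alt
  by_cases hbad : L.any (fun row => row.length ≠ 2) = true
  · rw [pvFirsts_of_bad L hbad, if_pos hbad]
  · simp only [Bool.not_eq_true] at hbad
    rw [pvFirsts_of_ok L hbad, if_neg (by rw [hbad]; exact Bool.false_ne_true)]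
    have hne : L.map (fun row => row.headI) ≠ [] := by
      intro h
      exact hpre (List.map_eq_nil_iff.mp h)
    obtain ⟨mini, hmin⟩ : ∃ m, PySem.List.min? (L.map (fun row => row.headI)) (fun x => x) = some m := by
      cases h : PySem.List.min? (L.map (fun row => row.headI)) (fun x => x) with
      | none => exact absurd ((PySem.List.min?_eq_none_iff _ _).mp h) hne
      | some m => exact ⟨m, rfl⟩
    obtain ⟨maxi, hmax⟩ : ∃ m, PySem.List.max? (L.map (fun row => row.headI)) (fun x => x) = some m := by
      cases h : PySem.List.max? (L.map (fun row => row.headI)) (fun x => x) with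
      | none => exact absurd ((PySem.List.max?_eq_none_iff _ _).mp h) hne
      | some m => exact ⟨m, rfl⟩
    simp only [hmin, hmax]
    exact pvCore _ mini maxi hmin hmax
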